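-- pv_equiv track=rewrite | github.com/Jenloke/DAA_PunnetSquare | final.py | generate_gene_combinations
-- ===== SOURCE A (Python) =====
-- def generate_gene_combinations(genes: list, index: int = 0, current: str = "") -> list[str]:
--     # base case if no elements/characters to add to every combination since index is already at the end of the list
--     if index == len(genes):
--         return [current]
--
--     # list that will contain every possible combination
--     combinations = []
--
--     for gene in genes[index]:
--         # current element (gene) that belong in the nested list is to be concatenated to new current variable
--         new_current = current + gene
--
--         # recursive call
--         # index is added by one because to proceed to the index of the next list in the nested list
--         # new_current is the new current parameter to produce every combination
--         sub_combinations = generate_gene_combinations(genes, index + 1, new_current)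
--
--         # after a base case is reached, elements of sub_combinations is to be extended to combinations list
--         combinations.extend(sub_combinations)
--
--     return combinations
-- ===== SOURCE B (Python) =====
-- def generate_gene_combinations(genes: list, index: int = 0, current: str = "") -> list[str]:
--     # Iterative fold: maintain the running list of partial combinations.
--     acc = [current]
--     for gene_list in genes[index:]:
--         acc = [c + g for c in acc for g in gene_list]
--     return acc
-- ===== Notes on version B (the rewrite author's own statement) =====
-- stated objective: simpler
-- what changed: Replaced the recursion on index (with an inner extend loop) by a single iterative left fold that maintains the running list of partial combinations over genes[index:].
-- outside the precondition, e.g. on generate_gene_combinations([['a', 'b']], -1, ''): A returns ['aa', 'ab', 'ba', 'bb'], B returns ['a', 'b']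
import Mathlib
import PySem

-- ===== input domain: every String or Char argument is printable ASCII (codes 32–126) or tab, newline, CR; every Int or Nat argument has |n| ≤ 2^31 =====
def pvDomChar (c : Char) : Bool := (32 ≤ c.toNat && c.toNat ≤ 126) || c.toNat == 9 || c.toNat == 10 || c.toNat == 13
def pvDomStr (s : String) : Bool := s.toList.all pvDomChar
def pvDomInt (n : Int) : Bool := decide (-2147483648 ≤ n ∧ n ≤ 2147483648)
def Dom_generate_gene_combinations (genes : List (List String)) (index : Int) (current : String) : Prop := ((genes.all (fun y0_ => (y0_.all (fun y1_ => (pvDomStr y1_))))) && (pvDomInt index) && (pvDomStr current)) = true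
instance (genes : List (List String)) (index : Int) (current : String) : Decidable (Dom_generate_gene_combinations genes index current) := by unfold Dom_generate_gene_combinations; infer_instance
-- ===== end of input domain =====

-- B replaces A's recursion on index by one iterative left fold over genes[index:] maintaining the running partial combinations (objective: simpler).


-- ===== PORT A =====
-- termination helper: a successful genes[index] access means index < len(genes)
theorem pvGet_some_lt {α : Type} (xs : List α) (i : Int) (v : α)
    (h : PySem.List.pyGet? xs i = some v) : i < (xs.length : Int) := by
  by_contra hge
  have : PySem.List.pyGet? xs i = none := by
    rw [PySem.List.pyGet?_eq_none_iff]
    intro hin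
    exact hge hin.2
  simp [this] at h

def generate_gene_combinations (genes : List (List String)) (index : Int) (current : String) : List String :=
  if index = (genes.length : Int) then [current]
  else
    match h : PySem.List.pyGet? genes index with
    | none => []  -- Python raises IndexError here; excluded by Pre_
    | some row =>
      row.foldl (fun combinations gene =>
        combinations ++ generate_gene_combinations genes (index + 1) (current ++ gene)) []
termination_by ((genes.length : Int) - index).toNat
decreasing_by
  have := pvGet_some_lt genes index row h
  omega

-- ===== PORT B =====
def generate_gene_combinations_alt (genes : List (List String)) (index : Int) (current : String) : List String :=
  (PySem.List.slice genes (some index) none).foldl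
    (fun acc gene_list => acc.flatMap (fun c => gene_list.map (fun g => c ++ g)))
    [current]

-- ===== PRECONDITION & SPEC =====
-- Pre_ is the natural domain of the recursion parameter: 0 ≤ index ≤ len(genes). For index > len(genes)
-- or index < -len(genes) A raises IndexError (see Raises_ below); for -len(genes) ≤ index < 0 A returns a
-- value that is an artefact of Python's negative-index wraparound (the product of the suffix followed by
-- the whole list again), which Pre_ excludes.
def Pre_generate_gene_combinations (genes : List (List String)) (index : Int) (current : String) : Prop :=
  0 ≤ index ∧ index ≤ (genes.length : Int)
instance (genes : List (List String)) (index : Int) (current : String) : Decidable (Pre_generate_gene_combinations genes index current) := by unfold Pre_generate_gene_combinations; infer_instance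

def pvWitness_generate_gene_combinations : List (List String) × Int × String :=
  ([["a", "b"], ["c"]], 0, "")

def Spec_generate_gene_combinations (genes : List (List String)) (index : Int) (current : String) (out : List String) : Prop := out = generate_gene_combinations_alt genes index current
instance (genes : List (List String)) (index : Int) (current : String) (out : List String) : Decidable (Spec_generate_gene_combinations genes index current out) := by unfold Spec_generate_gene_combinations; infer_instance

-- ===== CLAIM (what is proved, stated in full; the proofs are below) =====
def Claim_equal_generate_gene_combinations : Prop := ∀ (genes : List (List String)) (index : Int) (current : String), Dom_generate_gene_combinations genes index current → Pre_generate_gene_combinations genes index current → Spec_generate_gene_combinations genes index current (generate_gene_combinations genes index current)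


-- ===== LEMMAS AND PROOFS =====

-- B's fold step is linear in the accumulator
theorem pvFoldLinear (rows : List (List String)) (acc : List String) :
    rows.foldl (fun a gl => a.flatMap (fun c => gl.map (fun g => c ++ g))) acc
      = acc.flatMap (fun c => rows.foldl (fun a gl => a.flatMap (fun c' => gl.map (fun g => c' ++ g))) [c]) := by
  induction rows generalizing acc with
  | nil => simp [List.foldl]
  | cons row rest ih =>
    simp only [List.foldl]
    rw [ih, List.flatMap_assoc]
    apply List.flatMap_congr
    intro c _
    rw [ih]
    simp

-- main invariant: A at (index, current) equals B's fold over genes.drop index.toNat seeded with [current]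
theorem pvMain (genes : List (List String)) :
    ∀ (k : Nat) (index : Int) (current : String), 0 ≤ index → index ≤ (genes.length : Int) →
      ((genes.length : Int) - index).toNat = k →
      generate_gene_combinations genes index current
        = (genes.drop index.toNat).foldl
            (fun acc gl => acc.flatMap (fun c => gl.map (fun g => c ++ g))) [current] := by
  intro k
  induction k with
  | zero =>
    intro index current h0 hle hk
    have hix : index = (genes.length : Int) := by omega
    rw [generate_gene_combinations]
    simp [hix, List.drop_of_length_le]
  | succ n ih =>
    intro index current h0 hle hk
    have hlt : index < (genes.length : Int) := by omega
    have hne : ¬ index = (genes.length : Int) := by omega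
    have hnat : index.toNat < genes.length := by omega
    have hget : PySem.List.pyGet? genes index = some (genes[index.toNat]) := by
      rw [PySem.List.pyGet?_of_nonneg genes h0]
      simp [hnat]
    rw [generate_gene_combinations]
    simp only [hne, if_false]
    rw [hget]
    have hdrop : genes.drop index.toNat = genes[index.toNat] :: genes.drop (index + 1).toNat := by
      have : (index + 1).toNat = index.toNat + 1 := by omega
      rw [this, ← List.drop_drop]
      rw [List.drop_eq_getElem_cons hnat]
      simp
    rw [hdrop]
    simp only [List.foldl]
    -- LHS: foldl with extend = flatMap of recursive calls
    rw [PySem.List.foldl_append_eq_flatMap]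
    -- rewrite each recursive call via ih
    have hrec : ∀ g ∈ genes[index.toNat], generate_gene_combinations genes (index + 1) (current ++ g)
        = (genes.drop (index + 1).toNat).foldl
            (fun acc gl => acc.flatMap (fun c => gl.map (fun g' => c ++ g'))) [current ++ g] := by
      intro g _
      exact ih (index + 1) (current ++ g) (by omega) (by omega) (by omega)
    rw [List.flatMap_congr hrec]
    -- RHS: push the singleton seed through the first row
    rw [pvFoldLinear]
    simp [List.flatMap_map]

-- ===== VERDICT (by name: the statement is the Claim_ definition above) =====
theorem generate_gene_combinations_spec : Claim_equal_generate_gene_combinations := by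
  intro genes index current _ hpre
  unfold Spec_generate_gene_combinations generate_gene_combinations_alt
  rw [PySem.List.slice_from genes hpre.1]
  exact pvMain genes ((genes.length : Int) - index).toNat index current hpre.1 hpre.2 rfl
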